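-- pv_equiv track=rewrite | github.com/xiaotanyu13/Earrings | antiContent .py | three
-- ===== SOURCE A (Python) =====
-- def three(a:int,b:int):
--     if a <0:
--         #补码形式
--         binary_number2 = bin(a)[3:]
--         binary_number = '0'*(32 -len(binary_number2)) + binary_number2
--         x = []
--         for i in binary_number:  #取反
--             I = 1 if not int(i) else 0
--             x.append(str(I))
--         flipped_number1 = ''.join(x)
--         L = len(flipped_number1)
--         X = bin(~int(flipped_number1, 2))[3:]  #取反后+1
--         flipped_number = '0'*(L-len(X)) + X    #补回原来的长度   原理是要在取反后的二进制+1,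
--         return int('0' * b + flipped_number[:-b],2) if b else int( flipped_number,2)
--     else:
--         return int('0' * b + (bin(a)[2:])[:-b],2)   if b else a
-- ===== SOURCE B (Python) =====
-- def three(a: int, b: int):
--     # two's-complement wrap to the unsigned 32-bit value, then an arithmetic shift
--     u = a + (1 << 32) if a < 0 else a
--     return u >> b
-- ===== Notes on version B (the rewrite author's own statement) =====
-- stated objective: simpler
-- what changed: Replaces A's bin()/bit-flip/join/slice string machinery (explicit two's-complement construction character by character) with the closed-form wrap u = a + 2**32 for a < 0 and a single integer arithmetic shift u >> b.
-- outside the precondition, e.g. on three(5, -2): A returns 2, B raises ValueError; on three(-5, -2): A returns 3, B raises ValueError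
import Mathlib
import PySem

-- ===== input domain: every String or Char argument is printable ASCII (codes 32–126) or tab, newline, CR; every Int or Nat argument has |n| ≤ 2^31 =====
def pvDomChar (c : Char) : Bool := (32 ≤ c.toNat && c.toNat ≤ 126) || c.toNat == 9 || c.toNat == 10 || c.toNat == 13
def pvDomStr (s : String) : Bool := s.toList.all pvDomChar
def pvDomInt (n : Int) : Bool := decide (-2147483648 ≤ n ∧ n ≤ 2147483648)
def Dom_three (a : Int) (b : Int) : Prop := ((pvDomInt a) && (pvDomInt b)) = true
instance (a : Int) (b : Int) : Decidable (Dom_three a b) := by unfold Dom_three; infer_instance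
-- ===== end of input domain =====

-- B replaces A's string bit-twiddling with the closed-form two's-complement wrap and one arithmetic shift (simpler).

-- ===== PORT A =====
-- int(c) for the one-character strings A feeds to int(); PySem-exact
def pyIntChar (c : Char) : Int := (PySem.Int.ofChars? [c]).getD 0
-- int(s, 2) ported by hand as the base-2 left fold; exact for every string this program parses on
-- Pre_three (a non-empty run of '0'/'1' characters, no sign/whitespace/underscore/prefix)
def pyIntBin (cs : List Char) : Int := cs.foldl (fun n c => 2 * n + (if c = '1' then 1 else 0)) 0

def three (a : Int) (b : Int) : Int :=
  if a < 0 then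
    -- binary_number2 = bin(a)[3:]
    let binary_number2 := PySem.List.slice (PySem.Int.pyBin a).toList (some 3) none
    -- binary_number = '0'*(32-len(binary_number2)) + binary_number2
    let binary_number := PySem.List.pyRepeat ['0'] (32 - PySem.List.len binary_number2) ++ binary_number2
    -- for i in binary_number: I = 1 if not int(i) else 0; x.append(str(I))
    let x := binary_number.foldl
      (fun x i => x ++ [PySem.Int.toChars (if pyIntChar i = 0 then 1 else 0)]) ([] : List (List Char))
    -- flipped_number1 = ''.join(x)
    let flipped_number1 := PySem.Chars.join [] x
    let L := PySem.List.len flipped_number1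
    -- X = bin(~int(flipped_number1, 2))[3:]
    let X := PySem.List.slice (PySem.Int.pyBin (Int.not (pyIntBin flipped_number1))).toList (some 3) none
    -- flipped_number = '0'*(L-len(X)) + X
    let flipped_number := PySem.List.pyRepeat ['0'] (L - PySem.List.len X) ++ X
    -- return int('0'*b + flipped_number[:-b], 2) if b else int(flipped_number, 2)
    if b ≠ 0 then
      pyIntBin (PySem.List.pyRepeat ['0'] b ++ PySem.List.slice flipped_number none (some (-b)))
    else pyIntBin flipped_number
  else
    -- return int('0'*b + (bin(a)[2:])[:-b], 2) if b else a
    if b ≠ 0 then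
      pyIntBin (PySem.List.pyRepeat ['0'] b ++
        PySem.List.slice (PySem.List.slice (PySem.Int.pyBin a).toList (some 2) none) none (some (-b)))
    else a

-- ===== PORT B =====
def three_alt (a : Int) (b : Int) : Int :=
  let u := if a < 0 then a + 4294967296 else a
  u >>> b.toNat   -- u >> b; exact for 0 ≤ b (Pre_three), where Python's >> is Lean's >>>

-- ===== PRECONDITION & SPEC =====
-- Pre_three excludes negative b, on which A returns the first -b bits via an accidental slice
-- while Python's (and B's) '>>' raises ValueError.
def Pre_three (a : Int) (b : Int) : Prop := 0 ≤ b
instance (a : Int) (b : Int) : Decidable (Pre_three a b) := by unfold Pre_three; infer_instance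
def pvWitness_three : Int × Int := (-5, 2)

def Spec_three (a : Int) (b : Int) (out : Int) : Prop := out = three_alt a b
instance (a : Int) (b : Int) (out : Int) : Decidable (Spec_three a b out) := by unfold Spec_three; infer_instance

-- ===== CLAIM (what is proved, stated in full; the proofs are below) =====
def Claim_equal_three : Prop := ∀ (a : Int) (b : Int), Dom_three a b → Pre_three a b → Spec_three a b (three a b)

-- ===== LEMMAS AND PROOFS =====

-- pyIntBin with an arbitrary accumulator
theorem pyIntBin_foldl (cs : List Char) (n : Int) :
    cs.foldl (fun n c => 2 * n + (if c = '1' then 1 else 0)) n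
      = n * 2 ^ cs.length + pyIntBin cs := by
  induction cs generalizing n with
  | nil => simp [pyIntBin]
  | cons c cs ih =>
    simp only [List.foldl_cons, pyIntBin, List.length_cons]
    rw [ih, ih (2 * 0 + _)]
    ring

theorem pyIntBin_append (xs ys : List Char) :
    pyIntBin (xs ++ ys) = pyIntBin xs * 2 ^ ys.length + pyIntBin ys := by
  simp only [pyIntBin, List.foldl_append]
  rw [pyIntBin_foldl ys (List.foldl _ 0 xs)]
  rfl

theorem pyIntBin_replicate (k : Nat) : pyIntBin (List.replicate k '0') = 0 := by
  induction k with
  | zero => simp [pyIntBin]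
  | succ k ih =>
    have : List.replicate (k + 1) '0' = List.replicate k '0' ++ ['0'] := by
      rw [← List.replicate_succ']
    rw [this, pyIntBin_append, ih]
    simp [pyIntBin]

theorem pyIntBin_zeros_append (k : Nat) (cs : List Char) :
    pyIntBin (List.replicate k '0' ++ cs) = pyIntBin cs := by
  rw [pyIntBin_append, pyIntBin_replicate]; ring

-- value of the binary digit string of m
theorem pyIntBin_toDigits (m : Nat) : pyIntBin (Nat.toDigits 2 m) = (m : Int) := by
  induction m using Nat.strong_induction_on with
  | _ m ih =>
    rcases lt_or_ge m 2 with h | h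
    · rw [Nat.toDigits_of_lt_base h]
      interval_cases m <;> decide
    · rw [Nat.toDigits_of_base_le (by norm_num) h, pyIntBin_append,
        ih (m / 2) (Nat.div_lt_self (by omega) (by norm_num))]
      have hd : pyIntBin [(m % 2).digitChar] = ((m % 2 : Nat) : Int) := by
        rcases Nat.mod_two_eq_zero_or_one m with h' | h' <;> rw [h'] <;> decide
      rw [hd]
      simp only [List.length_singleton, pow_one]
      have := Nat.div_add_mod m 2
      push_cast
      omega

def IsBin (cs : List Char) : Prop := ∀ c ∈ cs, c = '0' ∨ c = '1'

theorem isBin_toDigits (m : Nat) : IsBin (Nat.toDigits 2 m) := by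
  induction m using Nat.strong_induction_on with
  | _ m ih =>
    rcases lt_or_ge m 2 with h | h
    · rw [Nat.toDigits_of_lt_base h]
      interval_cases m <;> simp [IsBin, Nat.digitChar]
    · rw [Nat.toDigits_of_base_le (by norm_num) h]
      intro c hc
      rcases List.mem_append.mp hc with hc | hc
      · exact ih (m / 2) (Nat.div_lt_self (by omega) (by norm_num)) c hc
      · have h2 : m % 2 < 2 := Nat.mod_lt _ (by norm_num)
        interval_cases h' : m % 2 <;> simp_all [Nat.digitChar]

theorem isBin_replicate_append (k : Nat) (cs : List Char) (h : IsBin cs) :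
    IsBin (List.replicate k '0' ++ cs) := by
  intro c hc
  rcases List.mem_append.mp hc with hc | hc
  · left; exact List.eq_of_mem_replicate hc
  · exact h c hc

theorem pyIntBin_nonneg_lt (cs : List Char) (h : IsBin cs) :
    0 ≤ pyIntBin cs ∧ pyIntBin cs < 2 ^ cs.length := by
  induction cs using List.reverseRecOn with
  | nil => simp [pyIntBin]
  | append_singleton xs c ih =>
    have hxs : IsBin xs := fun d hd => h d (List.mem_append.mpr (Or.inl hd))
    obtain ⟨h0, h1⟩ := ih hxs
    have hc : pyIntBin [c] = 0 ∨ pyIntBin [c] = 1 := by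
      rcases h c (List.mem_append.mpr (Or.inr (List.mem_singleton_self c))) with rfl | rfl
      · left; simp [pyIntBin]
      · right; simp [pyIntBin]
    rw [pyIntBin_append]
    simp only [List.length_append, List.length_singleton, pow_one]
    constructor
    · rcases hc with hc | hc <;> rw [hc] <;> positivity
    · rcases hc with hc | hc <;> rw [hc] <;> [skip; skip] <;> rw [pow_succ] <;> omega

-- the flip that A performs character by character
def flipc (c : Char) : Char := if c = '0' then '1' else '0'

theorem foldl_append_map (g : Char → List Char) (cs : List Char) (acc : List (List Char)) :
    cs.foldl (fun x i => x ++ [g i]) acc = acc ++ cs.map g := by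
  induction cs generalizing acc with
  | nil => simp
  | cons c cs ih => simp [ih]

theorem pyIntBin_map_flipc (cs : List Char) (h : IsBin cs) :
    pyIntBin (cs.map flipc) = 2 ^ cs.length - 1 - pyIntBin cs := by
  induction cs using List.reverseRecOn with
  | nil => simp [pyIntBin]
  | append_singleton xs c ih =>
    have hxs : IsBin xs := fun d hd => h d (List.mem_append.mpr (Or.inl hd))
    rw [List.map_append, pyIntBin_append, pyIntBin_append, ih hxs]
    simp only [List.length_map, List.length_append, List.length_singleton, pow_one]
    rcases h c (List.mem_append.mpr (Or.inr (List.mem_singleton_self c))) with rfl | rfl <;>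
      simp [pyIntBin, flipc, pow_succ] <;> ring

-- dropping the last k characters of a binary digit string floor-divides its value by 2^k
theorem pyIntBin_take_shift (cs : List Char) (k : Nat) (h : IsBin cs) :
    pyIntBin (cs.take (cs.length - k)) = pyIntBin cs / 2 ^ k := by
  rcases le_or_gt k cs.length with hk | hk
  · have hsplit : cs = cs.take (cs.length - k) ++ cs.drop (cs.length - k) :=
      (List.take_append_drop _ _).symm
    have hlen : (cs.drop (cs.length - k)).length = k := by
      rw [List.length_drop]; omega
    have hdropBin : IsBin (cs.drop (cs.length - k)) := fun d hd => h d (List.mem_of_mem_drop hd)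
    obtain ⟨hd0, hd1⟩ := pyIntBin_nonneg_lt _ hdropBin
    rw [hlen] at hd1
    conv_rhs => rw [hsplit]
    rw [pyIntBin_append, hlen]
    rw [add_comm, Int.add_mul_ediv_right _ _ (by positivity : (2:Int) ^ k ≠ 0),
      Int.ediv_eq_zero_of_lt hd0 hd1, zero_add]
  · obtain ⟨h0, h1⟩ := pyIntBin_nonneg_lt cs h
    have : cs.length - k = 0 := by omega
    rw [this, List.take_zero]
    have : pyIntBin cs / 2 ^ k = 0 := by
      apply Int.ediv_eq_zero_of_lt h0
      calc pyIntBin cs < 2 ^ cs.length := h1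
        _ ≤ 2 ^ k := by exact pow_le_pow_right₀ (by norm_num) (by omega)
    rw [this]; rfl

theorem length_toDigits_le (m k : Nat) (hk : 0 < k) (h : m < 2 ^ k) :
    (Nat.toDigits 2 m).length ≤ k :=
  (Nat.length_toDigits_le_iff (by norm_num) hk).mpr h

-- the per-character int() values A reads
theorem pyIntChar_zero : pyIntChar '0' = 0 := by decide
theorem pyIntChar_one : pyIntChar '1' = 1 := by decide

theorem int_not_eq (v : Int) : Int.not v = -v - 1 := by
  cases v with
  | ofNat n => simp [Int.not, Int.negSucc_eq]; ring
  | negSucc n => simp [Int.not, Int.negSucc_eq]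

-- A's negative branch builds exactly the 32-bit two's-complement digit string; its value is a + 2^32
theorem neg_branch_core (a : Int) (ha : a < 0) (hlo : -2147483648 ≤ a) :
    ∃ fn : List Char, IsBin fn ∧ fn.length = 32 ∧ pyIntBin fn = a + 4294967296 ∧
      (let binary_number2 := PySem.List.slice (PySem.Int.pyBin a).toList (some 3) none
       let binary_number := PySem.List.pyRepeat ['0'] (32 - PySem.List.len binary_number2) ++ binary_number2
       let x := binary_number.foldl
         (fun x i => x ++ [PySem.Int.toChars (if pyIntChar i = 0 then 1 else 0)]) ([] : List (List Char))
       let flipped_number1 := PySem.Chars.join [] x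
       let L := PySem.List.len flipped_number1
       let X := PySem.List.slice (PySem.Int.pyBin (Int.not (pyIntBin flipped_number1))).toList (some 3) none
       PySem.List.pyRepeat ['0'] (L - PySem.List.len X) ++ X) = fn := by
  -- m = -a, the magnitude
  set m := a.natAbs with hma
  have ham : (m : Int) = -a := by omega
  have hm1 : 1 ≤ m := by omega
  have hpow : (2:Nat) ^ 32 = 4294967296 := by norm_num
  have hmlt : m < 2 ^ 32 := by omega
  set ds := Nat.toDigits 2 m with hds
  have hbin1 : (PySem.Int.pyBin a).toList = '-' :: '0' :: 'b' :: ds := by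
    rw [PySem.Int.toList_pyBin, PySem.Int.toBinChars0b, if_pos ha]
  have hl32 : ds.length ≤ 32 := length_toDigits_le m 32 (by norm_num) hmlt
  have hslice3 : PySem.List.slice ('-' :: '0' :: 'b' :: ds) (some 3) none = ds := by
    rw [PySem.List.slice_from _ (by norm_num : (0:Int) ≤ 3)]; rfl
  set bn := List.replicate (32 - ds.length) '0' ++ ds with hbn
  have hbnBin : IsBin bn := isBin_replicate_append _ _ (isBin_toDigits m)
  have hbnlen : bn.length = 32 := by
    simp only [hbn, List.length_append, List.length_replicate]; omega
  have hbnval : pyIntBin bn = (m : Int) := by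
    rw [hbn, pyIntBin_zeros_append, hds, pyIntBin_toDigits]
  have hpad1 : PySem.List.pyRepeat ['0'] (32 - PySem.List.len ds) = List.replicate (32 - ds.length) '0' := by
    rw [PySem.List.pyRepeat_singleton]
    congr 1
    simp only [PySem.List.len_eq]
    omega
  -- the flip loop produces the singleton strings of the flipped characters
  have hfold : bn.foldl
      (fun x i => x ++ [PySem.Int.toChars (if pyIntChar i = 0 then 1 else 0)]) ([] : List (List Char))
      = (bn.map flipc).map (fun c => [c]) := by
    rw [foldl_append_map, List.map_map]
    apply List.map_congr_left
    intro c hc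
    rcases hbnBin c hc with rfl | rfl
    · simp only [pyIntChar_zero]; rfl
    · rw [pyIntChar_one, if_neg (by norm_num)]; rfl
  set f1 := bn.map flipc with hf1
  have hjoin : PySem.Chars.join [] (f1.map (fun c => [c])) = f1 := PySem.Chars.join_nil_singletons f1
  have hf1len : f1.length = 32 := by rw [hf1, List.length_map, hbnlen]
  have hf1val : pyIntBin f1 = 4294967295 - (m : Int) := by
    rw [hf1, pyIntBin_map_flipc bn hbnBin, hbnlen, hbnval]; norm_num
  -- ~int(flipped_number1, 2) = -(2^32 - m), a negative number of magnitude 2^32 - m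
  set u := 2 ^ 32 - m with hu
  have hu0 : 1 ≤ u := by omega
  have hult : u < 2 ^ 32 := by omega
  have hcast : ((u : Nat) : Int) = 4294967296 - (m : Int) := by omega
  have hnotval : Int.not (pyIntBin f1) = -(u : Int) := by
    rw [int_not_eq, hf1val]
    omega
  have hbin2 : (PySem.Int.pyBin (Int.not (pyIntBin f1))).toList
      = '-' :: '0' :: 'b' :: Nat.toDigits 2 u := by
    rw [PySem.Int.toList_pyBin, hnotval, PySem.Int.toBinChars0b,
      if_pos (by omega : -(u:Int) < 0), show (-(u:Int)).natAbs = u from by omega]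
  set X := Nat.toDigits 2 u with hX
  have hXl32 : X.length ≤ 32 := length_toDigits_le u 32 (by norm_num) hult
  have hsliceX : PySem.List.slice ('-' :: '0' :: 'b' :: X) (some 3) none = X := by
    rw [PySem.List.slice_from _ (by norm_num : (0:Int) ≤ 3)]; rfl
  have hpad2 : PySem.List.pyRepeat ['0'] (PySem.List.len f1 - PySem.List.len X)
      = List.replicate (32 - X.length) '0' := by
    rw [PySem.List.pyRepeat_singleton]
    congr 1
    simp only [PySem.List.len_eq, hf1len]
    omega
  refine ⟨List.replicate (32 - X.length) '0' ++ X,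
    isBin_replicate_append _ _ (isBin_toDigits u), ?_, ?_, ?_⟩
  · simp only [List.length_append, List.length_replicate]; omega
  · rw [pyIntBin_zeros_append, hX, pyIntBin_toDigits]
    omega
  · simp only [hbin1, hslice3, hpad1, ← hbn, hfold, hjoin, hbin2, hsliceX, hpad2]

-- value of '0'*k + cs[:-k] for a binary digit string cs: the right shift of its value
theorem shift_piece (cs : List Char) (k : Nat) (hk : 0 < k) (h : IsBin cs) :
    pyIntBin (PySem.List.pyRepeat ['0'] (k : Int) ++ PySem.List.slice cs none (some (-(k : Int))))
      = pyIntBin cs / 2 ^ k := by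
  rw [PySem.List.pyRepeat_singleton, Int.toNat_natCast,
    PySem.List.slice_to_neg_natCast cs k hk, pyIntBin_zeros_append,
    pyIntBin_take_shift cs k h]

-- ===== VERDICT (by name: the statement is the Claim_ definition above) =====
theorem three_spec : Claim_equal_three := by
  unfold Claim_equal_three
  intro a b hdom hpre
  unfold Spec_three three three_alt
  have hb0 : (0:Int) ≤ b := hpre
  have hdm : -2147483648 ≤ a ∧ a ≤ 2147483648 := by
    unfold Dom_three pvDomInt at hdom
    simp only [Bool.and_eq_true, decide_eq_true_eq] at hdom
    exact ⟨hdom.1.1, hdom.1.2⟩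
  set k := b.toNat with hkdef
  have hbk : b = (k : Int) := (Int.toNat_of_nonneg hb0).symm
  by_cases hneg : a < 0
  · rw [if_pos hneg, if_pos hneg]
    obtain ⟨fn, hfnBin, hfnLen, hfnVal, hfnEq⟩ := neg_branch_core a hneg hdm.1
    simp only [hfnEq]
    by_cases hb : b ≠ 0
    · rw [if_pos hb, hbk, shift_piece fn k (by omega) hfnBin]
      rw [show pyIntBin fn = a + 4294967296 from hfnVal,
        Int.shiftRight_eq_div_pow]
      norm_num
    · rw [if_neg hb, hfnVal]
      have : k = 0 := by omega
      rw [this, Int.shiftRight_eq_div_pow]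
      norm_num
  · rw [if_neg hneg, if_neg hneg]
    rw [Int.not_lt] at hneg
    set n := a.toNat with hn
    have han : a = (n : Int) := (Int.toNat_of_nonneg hneg).symm
    by_cases hb : b ≠ 0
    · rw [if_pos hb]
      have hbin : (PySem.Int.pyBin a).toList = '0' :: 'b' :: Nat.toDigits 2 n := by
        rw [PySem.Int.toList_pyBin, PySem.Int.toBinChars0b, if_neg (by omega)]
      have hslice2 : PySem.List.slice ('0' :: 'b' :: Nat.toDigits 2 n) (some 2) none
          = Nat.toDigits 2 n := by
        rw [PySem.List.slice_from _ (by norm_num : (0:Int) ≤ 2)]; rfl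
      rw [hbin, hslice2, hbk, shift_piece _ k (by omega) (isBin_toDigits n),
        pyIntBin_toDigits, Int.shiftRight_eq_div_pow, han]
      norm_num
    · rw [if_neg hb]
      have : k = 0 := by omega
      rw [this, Int.shiftRight_eq_div_pow]
      norm_num
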